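-- pv_equiv track=rewrite | github.com/souravsankalp/PrescriptionMedicineExtractor | clean.py | _fix_spaced_letters
-- ===== SOURCE A (Python) =====
-- def _fix_spaced_letters(line: str) -> str:
--     """
--     Fix patterns like: 'Cry s t a | Ey e s' -> 'Crystal Eyes'
--     by joining sequences of single-letter tokens and cleaning '|'.
--     """
--     tokens = line.split()
--     new_tokens = []
--     buffer = []
--
--     for tok in tokens:
--         t = tok.replace("|", "l")  # common OCR issue: '|' instead of 'l'
--
--         if len(t) == 1 and t.isalpha():
--             # part of a spaced-out word (C r y s t a l)
--             buffer.append(t)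
--         else:
--             if buffer:
--                 new_tokens.append("".join(buffer))
--                 buffer = []
--             new_tokens.append(t)
--
--     if buffer:
--         new_tokens.append("".join(buffer))
--
--     return " ".join(new_tokens)
-- ===== SOURCE B (Python) =====
-- def _fix_spaced_letters(line: str) -> str:
--     # Pairwise-gap strategy: never accumulate runs; fix '|'->'l' per token,
--     # then decide each inter-token gap locally (glue iff both neighbours are
--     # single letters) and concatenate everything in one join.
--     ts = [t.replace("|", "l") for t in line.split()]
--     def single(t):
--         return len(t) == 1 and t.isalpha()
--     seps = ["" if single(u) and single(v) else " " for u, v in zip(ts, ts[1:])]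
--     return "".join(ts[:1] + [s + v for s, v in zip(seps, ts[1:])])
-- ===== Notes on version B (the rewrite author's own statement) =====
-- stated objective: alternative
-- what changed: A accumulates runs of single-letter tokens in a mutable buffer, flushing words into new_tokens and joining with spaces; B keeps no run state at all: it decides each inter-token gap locally from its two neighbours (empty iff both are single letters) via zip over adjacent pairs and concatenates tokens and gaps in one join.
import Mathlib
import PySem

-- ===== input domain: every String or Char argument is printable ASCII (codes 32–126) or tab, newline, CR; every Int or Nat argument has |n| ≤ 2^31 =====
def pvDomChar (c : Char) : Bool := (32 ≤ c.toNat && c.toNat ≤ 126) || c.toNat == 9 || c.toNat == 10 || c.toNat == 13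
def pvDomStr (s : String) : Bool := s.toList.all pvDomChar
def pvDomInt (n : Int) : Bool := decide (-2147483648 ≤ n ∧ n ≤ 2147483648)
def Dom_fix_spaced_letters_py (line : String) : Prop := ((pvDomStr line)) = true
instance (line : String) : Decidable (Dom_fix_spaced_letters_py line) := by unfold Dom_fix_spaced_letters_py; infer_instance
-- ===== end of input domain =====

-- B replaces A's run-buffering state machine with a stateless pairwise-gap computation
-- (each inter-token separator decided locally from its two neighbours); return values proved equal.

-- ===== PORT A =====
-- A's for-loop as structural recursion over the same (new_tokens, buffer) state.
def fixLoopA : List String → List String × List String → List String × List String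
  | [], st => st
  | tok :: rest, (newtoks, buffer) =>
    let t := PySem.Str.replace tok "|" "l"
    if PySem.Str.len t = 1 && PySem.Str.strIsalpha t then
      fixLoopA rest (newtoks, buffer ++ [t])
    else if buffer.isEmpty then
      fixLoopA rest (newtoks ++ [t], buffer)
    else
      fixLoopA rest (newtoks ++ [PySem.Str.join "" buffer, t], [])

def fix_spaced_letters_py (line : String) : String :=
  let tokens := PySem.Str.split₀ line
  let st := fixLoopA tokens ([], [])
  let newtoks := if st.2.isEmpty then st.1 else st.1 ++ [PySem.Str.join "" st.2]
  PySem.Str.join " " newtoks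

-- ===== PORT B =====
def singleB (t : String) : Bool := PySem.Str.len t = 1 && PySem.Str.strIsalpha t

def fix_spaced_letters_py_alt (line : String) : String :=
  let ts := (PySem.Str.split₀ line).map (fun t => PySem.Str.replace t "|" "l")
  let seps := (ts.zip ts.tail).map (fun p => if singleB p.1 && singleB p.2 then "" else " ")
  PySem.Str.join ""
    (PySem.List.slice ts none (some 1) ++
      (seps.zip (PySem.List.slice ts (some 1) none)).map (fun p => p.1 ++ p.2))

-- ===== PRECONDITION & SPEC =====
def Spec_fix_spaced_letters_py (line : String) (out : String) : Prop := out = fix_spaced_letters_py_alt line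
instance (line : String) (out : String) : Decidable (Spec_fix_spaced_letters_py line out) := by unfold Spec_fix_spaced_letters_py; infer_instance

-- ===== CLAIM (what is proved, stated in full; the proofs are below) =====
def Claim_equal_fix_spaced_letters_py : Prop := ∀ (line : String), Dom_fix_spaced_letters_py line → Spec_fix_spaced_letters_py line (fix_spaced_letters_py line)

-- ===== LEMMAS AND PROOFS =====

-- A's loop on already-mapped tokens (proof device).
def fixLoopT : List String → List String × List String → List String × List String
  | [], st => st
  | t :: rest, (newtoks, buffer) =>
    if singleB t then
      fixLoopT rest (newtoks, buffer ++ [t])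
    else if buffer.isEmpty then
      fixLoopT rest (newtoks ++ [t], buffer)
    else
      fixLoopT rest (newtoks ++ [PySem.Str.join "" buffer, t], [])

theorem fixLoopA_eq_fixLoopT (ts : List String) (st : List String × List String) :
    fixLoopA ts st = fixLoopT (ts.map (fun tok => PySem.Str.replace tok "|" "l")) st := by
  induction ts generalizing st with
  | nil => rfl
  | cons tok rest ih =>
    obtain ⟨nt, buf⟩ := st
    simp only [fixLoopA, fixLoopT, List.map, singleB]
    split_ifs <;> apply ih

def finalizeA (st : List String × List String) : List String :=
  if st.2.isEmpty then st.1 else st.1 ++ [PySem.Str.join "" st.2]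

-- the maximal runs of single-letter tokens, each joined (proof device for A's loop)
def runsOf : List String → List String
  | [] => []
  | t :: rest =>
    if singleB t then
      PySem.Str.join "" (t :: rest.takeWhile singleB) :: runsOf (rest.dropWhile singleB)
    else
      t :: runsOf rest
termination_by ts => ts.length
decreasing_by
  · simpa using Nat.lt_succ_of_le (List.length_dropWhile_le _ _)
  · simp

def emitR (buf ts : List String) : List String :=
  if buf.isEmpty then runsOf ts
  else PySem.Str.join "" (buf ++ ts.takeWhile singleB) :: runsOf (ts.dropWhile singleB)

theorem fixLoopT_emit (ts : List String) (nt buf : List String) :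
    finalizeA (fixLoopT ts (nt, buf)) = nt ++ emitR buf ts := by
  induction ts generalizing nt buf with
  | nil =>
    simp only [fixLoopT, finalizeA, emitR, List.takeWhile_nil, List.dropWhile_nil,
      List.append_nil]
    by_cases h : buf.isEmpty <;> simp [h, runsOf]

  | cons t rest ih =>
    simp only [fixLoopT]
    by_cases hk : singleB t
    · simp only [hk, if_pos, ih, emitR]
      have hne : (buf ++ [t]).isEmpty = false := by simp
      rw [hne]
      by_cases hb : buf.isEmpty
      · have : buf = [] := List.isEmpty_iff.mp hb
        subst this
        simp [runsOf, hk]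
      · rw [if_neg (by simp), if_neg (by simp [hb])]
        simp [hk]
    · rw [if_neg (by simp [hk])]
      by_cases hb : buf.isEmpty
      · have : buf = [] := List.isEmpty_iff.mp hb
        subst this
        rw [if_pos (by simp), ih]
        simp [emitR, runsOf, hk]
      · rw [if_neg hb, ih]
        have hbuf : buf.isEmpty = false := by simpa using hb
        simp [emitR, hbuf, runsOf, hk]

-- the character stream both programs produce: each gap is [] iff both neighbours are single letters
def gapC (u v : String) : List Char := if singleB u && singleB v then [] else [' ']

def tailC : String → List String → List Char
  | _, [] => []
  | u, v :: rest => gapC u v ++ v.toList ++ tailC v rest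

def streamC : List String → List Char
  | [] => []
  | t :: rest => t.toList ++ tailC t rest

-- join with "" concatenates
theorem join_empty_toList (L : List String) :
    (PySem.Str.join "" L).toList = (L.map String.toList).flatten := by
  induction L with
  | nil => simp [PySem.Str.toList_join, PySem.Chars.join_nil]
  | cons a L ih =>
    cases L with
    | nil => simp [PySem.Str.toList_join, PySem.Chars.join_singleton]
    | cons b L' =>
      simp only [PySem.Str.toList_join, List.map] at ih ⊢
      rw [PySem.Chars.join_cons_cons, ih]
      simp

-- join " " (x :: L): head then, if L nonempty, a space and the rest
theorem join_space_cons (x : String) (L : List String) :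
    (PySem.Str.join " " (x :: L)).toList
      = x.toList ++ (if L.isEmpty then [] else ' ' :: (PySem.Str.join " " L).toList) := by
  cases L with
  | nil => simp [PySem.Str.toList_join, PySem.Chars.join_singleton]
  | cons b L' =>
    simp only [PySem.Str.toList_join, List.map]
    rw [PySem.Chars.join_cons_cons]
    simp

theorem runsOf_ne_nil (ts : List String) (h : ts ≠ []) : runsOf ts ≠ [] := by
  cases ts with
  | nil => exact absurd rfl h
  | cons t rest =>
    rw [runsOf]
    split <;> simp

-- A's output characters are exactly the pairwise-gap stream
theorem runs_stream (ts : List String) :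
    (PySem.Str.join " " (runsOf ts)).toList = streamC ts := by
  induction hn : ts.length using Nat.strong_induction_on generalizing ts with
  | _ n ih =>
  cases ts with
  | nil => simp [runsOf, streamC, PySem.Str.toList_join, PySem.Chars.join_nil]
  | cons t rest =>
    subst hn
    by_cases hk : singleB t
    · cases rest with
      | nil =>
        simp [runsOf, hk, streamC, tailC, PySem.Str.toList_join, PySem.Chars.join_singleton]
      | cons v rest' =>
        by_cases hv : singleB v
        · -- t and v glued in the same run
          rw [runsOf, if_pos hk]
          have hTW : (v :: rest').takeWhile singleB = v :: rest'.takeWhile singleB := by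
            simp [hv]
          have hDW : (v :: rest').dropWhile singleB = rest'.dropWhile singleB := by
            simp [hv]
          rw [hTW, hDW, join_space_cons]
          have hjoin : (PySem.Str.join "" (t :: v :: rest'.takeWhile singleB)).toList
              = t.toList ++ (PySem.Str.join "" (v :: rest'.takeWhile singleB)).toList := by
            simp only [PySem.Str.toList_join, List.map]
            rw [PySem.Chars.join_cons_cons]
            simp
          rw [hjoin, List.append_assoc]
          have ihv := ih (v :: rest').length (by simp) (v :: rest') rfl
          rw [runsOf, if_pos hv, join_space_cons] at ihv
          rw [ihv]
          simp [streamC, tailC, gapC, hk, hv]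
        · -- run of length 1 at t (next token breaks it)
          rw [runsOf, if_pos hk]
          have hTW : (v :: rest').takeWhile singleB = [] := by simp [hv]
          have hDW : (v :: rest').dropWhile singleB = v :: rest' := by
            simp [hv]
          rw [hTW, hDW, join_space_cons]
          have ihv := ih (v :: rest').length (by simp) (v :: rest') rfl
          have hne : (runsOf (v :: rest')).isEmpty = false := by
            simpa [List.isEmpty_iff] using runsOf_ne_nil (v :: rest') (by simp)
          rw [hne, ihv]
          simp only [streamC, tailC, gapC, hv, Bool.and_false]
          simp [PySem.Str.toList_join, PySem.Chars.join_singleton]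
    · -- t is not a single letter: emitted alone
      rw [runsOf, if_neg hk]
      rw [join_space_cons]
      cases rest with
      | nil => simp [runsOf, streamC, tailC]
      | cons v rest' =>
        have ihv := ih (v :: rest').length (by simp) (v :: rest') rfl
        have hne : (runsOf (v :: rest')).isEmpty = false := by
          simpa [List.isEmpty_iff] using runsOf_ne_nil (v :: rest') (by simp)
        rw [hne, ihv]
        simp [streamC, tailC, gapC, hk]

-- B's output characters are the same stream
theorem alt_stream (ts : List String) :
    (PySem.Str.join ""
      (PySem.List.slice ts none (some 1) ++
        (((ts.zip ts.tail).map (fun p => if singleB p.1 && singleB p.2 then "" else " ")).zip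
            (PySem.List.slice ts (some 1) none)).map (fun p => p.1 ++ p.2))).toList
      = streamC ts := by
  rw [PySem.List.slice_to _ (by norm_num), PySem.List.slice_from _ (a := 1) (by norm_num)]
  cases ts with
  | nil => simp [streamC, PySem.Str.toList_join, PySem.Chars.join_nil]
  | cons t rest =>
    rw [join_empty_toList]
    simp only [List.tail_cons, streamC]
    have : ∀ (u : String) (rs : List String),
        ((((((u :: rs).zip rs).map (fun p => if singleB p.1 && singleB p.2 then "" else " ")).zip
            rs).map (fun p => p.1 ++ p.2)).map String.toList).flatten = tailC u rs := by
      intro u rs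
      induction rs generalizing u with
      | nil => simp [tailC]
      | cons v rest' ihr =>
        simp only [List.zip_cons_cons, List.map_cons, List.flatten_cons, tailC, gapC]
        rw [ihr v]
        by_cases h : singleB u && singleB v
        · simp [h]
        · simp only [String.toList_append]
          simp [h]
    simpa using congrArg (fun l => t.toList ++ l) (this t rest)

-- ===== VERDICT (by name: the statement is the Claim_ definition above) =====
theorem fix_spaced_letters_py_spec : Claim_equal_fix_spaced_letters_py := by
  intro line _
  show _ = _
  rw [← String.toList_inj]
  unfold fix_spaced_letters_py fix_spaced_letters_py_alt
  simp only []
  rw [show (fixLoopA (PySem.Str.split₀ line) ([], [])) = _ from fixLoopA_eq_fixLoopT _ _]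
  have h := fixLoopT_emit ((PySem.Str.split₀ line).map (fun tok => PySem.Str.replace tok "|" "l")) [] []
  simp only [finalizeA, emitR, List.isEmpty_nil, if_pos, List.nil_append] at h
  rw [h, runs_stream, alt_stream]
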